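-- pv_equiv track=rewrite | github.com/Elgolfin/adventofcode-2018 | day06_lib.py | getLargestArea
-- ===== SOURCE A (Python) =====
-- from collections import defaultdict
--
-- def getLargestArea (coordinates, grid):
--     """Get the grid largest finite area"""
--     areas = defaultdict(lambda: 0)
--     infinite_areas = set()
--     for x in range(len(grid)):
--         for y in range(len(grid[x])):
--             if grid[x][y] == '.':
--                 continue
--             areas[grid[x][y]] += 1
--             if x == 0 or x == len(grid) - 1 or y == 0 or y == len(grid[x]) - 1:
--                 infinite_areas = infinite_areas | { grid[x][y] }
--
--     for point in infinite_areas: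
--         del areas[point]
--
--     return max(areas.values())
-- ===== SOURCE B (Python) =====
-- def getLargestArea(coordinates, grid):
--     """Get the grid largest finite area"""
--     infinite = set()
--     if grid:
--         infinite.update(grid[0])
--         infinite.update(grid[-1])
--         for row in grid:
--             if row:
--                 infinite.update((row[0], row[-1]))
--     labels = []
--     for row in grid:
--         for c in row:
--             if c != '.' and c not in infinite and c not in labels:
--                 labels.append(c)
--     return max(sum(row.count(c) for row in grid) for c in labels)
-- ===== Notes on version B (the rewrite author's own statement) =====
-- stated objective: alternative
-- what changed: A makes one cell-major pass incrementing a per-label dict while flagging border labels inline, then deletes the infinite keys and takes max of the dict values; B keeps no counting structure at all: it builds the infinite-label set from the boundary cells only, collects the remaining distinct labels, and for each candidate label recounts its occurrences label-major with row.count, taking max of those sums.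
import Mathlib
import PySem

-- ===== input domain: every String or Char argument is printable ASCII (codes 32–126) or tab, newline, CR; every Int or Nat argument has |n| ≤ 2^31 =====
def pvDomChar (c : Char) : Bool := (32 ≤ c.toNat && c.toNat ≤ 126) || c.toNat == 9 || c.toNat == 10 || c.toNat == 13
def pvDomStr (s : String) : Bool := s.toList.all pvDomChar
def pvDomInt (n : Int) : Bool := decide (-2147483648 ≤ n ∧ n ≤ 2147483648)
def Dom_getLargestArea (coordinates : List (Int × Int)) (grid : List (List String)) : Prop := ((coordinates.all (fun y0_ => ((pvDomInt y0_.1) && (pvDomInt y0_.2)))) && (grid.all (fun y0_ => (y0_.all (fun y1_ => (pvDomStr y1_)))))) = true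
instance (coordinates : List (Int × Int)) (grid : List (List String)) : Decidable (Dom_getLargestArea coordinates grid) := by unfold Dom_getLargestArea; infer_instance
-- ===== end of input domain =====

-- B keeps no counting structure at all: it collects the infinite labels from the boundary cells,
-- lists the remaining distinct labels, and recounts each candidate label-major with row.count,
-- taking the max of those sums (alternative decomposition, not claimed faster).

-- ===== PORT A =====
def getLargestArea (coordinates : List (Int × Int)) (grid : List (List String)) : Int :=
  let st :=
    (PySem.List.pyRange 0 (PySem.List.len grid)).foldl
      (fun st x =>
        let row := PySem.List.pyGetD grid x []
        (PySem.List.pyRange 0 (PySem.List.len row)).foldl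
          (fun st y =>
            let c := PySem.List.pyGetD row y ""
            if c == "." then st
            else
              (st.1.modify c 0 (· + 1),
               if x == 0 || x == PySem.List.len grid - 1 || y == 0 || y == PySem.List.len row - 1
               then PySem.Set.union st.2 [c] else st.2))
          st)
      ((PySem.Dict.empty : PySem.Dict String Int), (PySem.Set.empty : PySem.Set String))
  let areas := st.2.foldl (fun d point => d.erase point) st.1
  (PySem.List.max? areas.values (fun v => v)).getD 0  -- max() raises on empty: excluded by Pre_

-- ===== PORT B =====
def getLargestArea_alt (coordinates : List (Int × Int)) (grid : List (List String)) : Int :=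
  let infinite : PySem.Set String :=
    if grid.isEmpty then PySem.Set.empty
    else
      grid.foldl
        (fun s row =>
          if row.isEmpty then s
          else PySem.Set.update s [PySem.List.pyGetD row 0 "", PySem.List.pyGetD row (-1) ""])
        (PySem.Set.update
          (PySem.Set.update (PySem.Set.empty : PySem.Set String) (PySem.List.pyGetD grid 0 []))
          (PySem.List.pyGetD grid (-1) []))
  let labels : List String :=
    grid.foldl
      (fun acc row =>
        row.foldl
          (fun acc c =>
            if !(c == ".") && !(PySem.Set.contains infinite c) && !(acc.contains c)
            then acc ++ [c] else acc)
          acc)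
      []
  (PySem.List.max?
    (labels.map (fun c =>
      grid.foldl (fun acc row => acc + (PySem.List.count row c : Int)) 0))
    (fun v => v)).getD 0  -- max() raises on the empty generator: excluded by Pre_

-- ===== PRECONDITION & SPEC =====
-- the border cells of the grid: first row, last row, and both ends of every row
def pvBorderCells (grid : List (List String)) : List String :=
  (if grid.isEmpty then [] else PySem.List.pyGetD grid 0 [] ++ PySem.List.pyGetD grid (-1) [])
    ++ grid.flatMap (fun row =>
        if row.isEmpty then [] else [PySem.List.pyGetD row 0 "", PySem.List.pyGetD row (-1) ""])

-- Pre_ excludes exactly the inputs where Python's max() raises ValueError: grids whose every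
-- non-'.' label also appears on the border (there both A and B raise).
def Pre_getLargestArea (coordinates : List (Int × Int)) (grid : List (List String)) : Prop :=
  (grid.flatten.any (fun c => !(c == ".") && !((pvBorderCells grid).contains c))) = true
instance (coordinates : List (Int × Int)) (grid : List (List String)) : Decidable (Pre_getLargestArea coordinates grid) := by unfold Pre_getLargestArea; infer_instance

def pvWitness_getLargestArea : (List (Int × Int)) × List (List String) :=
  ([], [[".", ".", "."], [".", "A", "."], [".", ".", "."]])

def Spec_getLargestArea (coordinates : List (Int × Int)) (grid : List (List String)) (out : Int) : Prop := out = getLargestArea_alt coordinates grid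
instance (coordinates : List (Int × Int)) (grid : List (List String)) (out : Int) : Decidable (Spec_getLargestArea coordinates grid out) := by unfold Spec_getLargestArea; infer_instance

-- ===== CLAIM (what is proved, stated in full; the proofs are below) =====
def Claim_equal_getLargestArea : Prop := ∀ (coordinates : List (Int × Int)) (grid : List (List String)), Dom_getLargestArea coordinates grid → Pre_getLargestArea coordinates grid → Spec_getLargestArea coordinates grid (getLargestArea coordinates grid)

-- ===== LEMMAS AND PROOFS =====

def pvFlag (n m x y : Int) : Bool := x == 0 || x == n - 1 || y == 0 || y == m - 1
def pvCellA (n m x y : Int) (st : PySem.Dict String Int × PySem.Set String) (c : String) :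
    PySem.Dict String Int × PySem.Set String :=
  if c == "." then st
  else
    (st.1.modify c 0 (· + 1),
     if x == 0 || x == n - 1 || y == 0 || y == m - 1 then PySem.Set.union st.2 [c] else st.2)
def pvCellD (d : PySem.Dict String Int) (c : String) : PySem.Dict String Int :=
  if c == "." then d else d.modify c 0 (· + 1)
def pvCellS (n m x y : Int) (s : PySem.Set String) (c : String) : PySem.Set String :=
  if !(c == ".") && pvFlag n m x y then PySem.Set.add s c else s

lemma cellA_split (n m x y : Int) (st : PySem.Dict String Int × PySem.Set String) (c : String) :
    pvCellA n m x y st c = (pvCellD st.1 c, pvCellS n m x y st.2 c) := by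
  unfold pvCellA pvCellD pvCellS pvFlag
  by_cases h : c = "."
  · simp [h]
  · have h' : (c == ".") = false := by simp [h]
    simp only [h', Bool.false_eq_true, if_false, Bool.not_false, Bool.true_and]
    by_cases hf : (x == 0 || x == n - 1 || y == 0 || y == m - 1) = true
    · simp [hf, PySem.Set.union, PySem.Set.update]
    · simp [Bool.eq_false_iff.mpr hf]

def pvRowFoldR (n x : Int) (st : PySem.Dict String Int × PySem.Set String) (row : List String) :
    PySem.Dict String Int × PySem.Set String :=
  (PySem.List.pyRange 0 (PySem.List.len row)).foldl
    (fun st y => pvCellA n (PySem.List.len row) x y st (PySem.List.pyGetD row y "")) st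

def pvStateA (grid : List (List String)) : PySem.Dict String Int × PySem.Set String :=
  (PySem.List.pyRange 0 (PySem.List.len grid)).foldl
    (fun st x => pvRowFoldR (PySem.List.len grid) x st (PySem.List.pyGetD grid x []))
    ((PySem.Dict.empty : PySem.Dict String Int), (PySem.Set.empty : PySem.Set String))

def pvL (grid : List (List String)) : List String := grid.flatten.filter (fun c => !(c == "."))

def pvBL (grid : List (List String)) : List String :=
  (PySem.List.enumerate grid).flatMap (fun p =>
    ((PySem.List.enumerate p.2).filter
       (fun q => !(q.2 == ".") && pvFlag (PySem.List.len grid) (PySem.List.len p.2) p.1 q.1)).map (·.2))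

lemma portA_eval (coordinates : List (Int × Int)) (grid : List (List String)) :
    getLargestArea coordinates grid =
      (PySem.List.max?
        (((pvStateA grid).2.foldl (fun d point => d.erase point) (pvStateA grid).1).values)
        (fun v => v)).getD 0 := rfl

lemma foldl_pyRange_enum {alpha sigma : Type} (xs : List alpha) (d : alpha)
    (G : sigma → Int → alpha → sigma) (init : sigma) :
    List.foldl (fun st p => G st p.1 p.2) init (PySem.List.enumerate xs)
    = List.foldl (fun st j => G st j (PySem.List.pyGetD xs j d)) init
        (PySem.List.pyRange 0 (PySem.List.len xs)) := by
  rw [PySem.List.enumerate_eq_map_pyRange xs d, List.foldl_map]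

lemma rowFoldR_eq (n x : Int) (st : PySem.Dict String Int × PySem.Set String) (row : List String) :
    pvRowFoldR n x st row =
      ((PySem.List.enumerate row).foldl (fun d q => pvCellD d q.2) st.1,
       (PySem.List.enumerate row).foldl
         (fun s q => pvCellS n (PySem.List.len row) x q.1 s q.2) st.2) := by
  have h1 : pvRowFoldR n x st row
      = List.foldl (fun st q => pvCellA n (PySem.List.len row) x q.1 st q.2) st
          (PySem.List.enumerate row) :=
    (foldl_pyRange_enum row "" (fun st y c => pvCellA n (PySem.List.len row) x y st c) st).symm
  rw [h1]
  have h2 : (fun (st : PySem.Dict String Int × PySem.Set String) (q : Int × String) =>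
      pvCellA n (PySem.List.len row) x q.1 st q.2)
      = (fun st q => (pvCellD st.1 q.2, pvCellS n (PySem.List.len row) x q.1 st.2 q.2)) := by
    funext st q
    exact cellA_split n (PySem.List.len row) x q.1 st q.2
  rw [h2]
  obtain ⟨d, s⟩ := st
  exact PySem.List.foldl_prod_mk (fun d (q : Int × String) => pvCellD d q.2)
    (fun s (q : Int × String) => pvCellS n (PySem.List.len row) x q.1 s q.2)
    (PySem.List.enumerate row) d s

lemma stateA_eq (grid : List (List String)) :
    pvStateA grid = (PySem.Dict.counter (pvL grid), PySem.Set.ofList (pvBL grid)) := by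
  have h1 : pvStateA grid
      = List.foldl (fun st p => pvRowFoldR (PySem.List.len grid) p.1 st p.2)
          ((PySem.Dict.empty : PySem.Dict String Int), (PySem.Set.empty : PySem.Set String))
          (PySem.List.enumerate grid) :=
    (foldl_pyRange_enum grid [] (fun st j row => pvRowFoldR (PySem.List.len grid) j st row) _).symm
  rw [h1]
  have h2 : (fun (st : PySem.Dict String Int × PySem.Set String) (p : Int × List String) =>
        pvRowFoldR (PySem.List.len grid) p.1 st p.2)
      = (fun st p => ((PySem.List.enumerate p.2).foldl (fun d q => pvCellD d q.2) st.1,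
          (PySem.List.enumerate p.2).foldl
            (fun s q => pvCellS (PySem.List.len grid) (PySem.List.len p.2) p.1 q.1 s q.2) st.2)) := by
    funext st p
    exact rowFoldR_eq (PySem.List.len grid) p.1 st p.2
  rw [h2]
  rw [PySem.List.foldl_prod_mk
    (f := fun d (p : Int × List String) => (PySem.List.enumerate p.2).foldl (fun d q => pvCellD d q.2) d)
    (g := fun s (p : Int × List String) => (PySem.List.enumerate p.2).foldl
      (fun s q => pvCellS (PySem.List.len grid) (PySem.List.len p.2) p.1 q.1 s q.2) s)]
  rw [Prod.mk.injEq]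
  constructor
  · -- dict component
    rw [← List.foldl_flatMap]
    have hb : (fun (d : PySem.Dict String Int) (q : Int × String) => pvCellD d q.2)
        = (fun d q => if (fun (q : Int × String) => !(q.2 == ".")) q = true
            then d.modify q.2 0 (· + 1) else d) := by
      funext d q
      unfold pvCellD
      cases h : q.2 == "." <;> simp [h]
    rw [hb, PySem.List.foldl_if_eq_foldl_filter,
      ← List.foldl_map (f := fun q : Int × String => q.2)
        (g := fun (d : PySem.Dict String Int) (c : String) => d.modify c 0 (· + 1))]
    rw [← PySem.Dict.counter_eq_foldl]
    congr 1
    rw [show (fun (q : Int × String) => !(q.2 == ".")) = ((fun c => !(c == ".")) ∘ (fun q : Int × String => q.2)) from rfl,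
      ← List.filter_map]
    unfold pvL
    congr 1
    rw [List.map_flatMap]
    simp only [PySem.List.map_snd_enumerate]
    rw [List.flatMap_def, PySem.List.map_snd_enumerate]
  · -- set component
    have hb : ∀ (p : Int × List String),
        (fun (s : PySem.Set String) (q : Int × String) =>
            pvCellS (PySem.List.len grid) (PySem.List.len p.2) p.1 q.1 s q.2)
        = (fun s q => if (fun (q : Int × String) =>
              !(q.2 == ".") && pvFlag (PySem.List.len grid) (PySem.List.len p.2) p.1 q.1) q = true
            then PySem.Set.add s q.2 else s) := by
      intro p; funext s q; rfl
    have h3 : (fun (s : PySem.Set String) (p : Int × List String) =>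
          List.foldl (fun s q => pvCellS (PySem.List.len grid) (PySem.List.len p.2) p.1 q.1 s q.2) s
            (PySem.List.enumerate p.2))
        = (fun s p => List.foldl PySem.Set.add s
            (((PySem.List.enumerate p.2).filter
               (fun q => !(q.2 == ".") && pvFlag (PySem.List.len grid) (PySem.List.len p.2) p.1 q.1)).map (·.2))) := by
      funext s p
      rw [hb p, PySem.List.foldl_if_eq_foldl_filter,
        ← List.foldl_map (f := fun q : Int × String => q.2) (g := PySem.Set.add)]
    rw [h3, ← List.foldl_flatMap]
    rw [PySem.Set.ofList_eq_foldl]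
    rfl

lemma items_foldl_erase (S : List String) (d : PySem.Dict String Int) :
    (S.foldl (fun d k => d.erase k) d).items
      = d.items.filter (fun p => !(S.contains p.1)) := by
  induction S generalizing d with
  | nil => simp
  | cons k S ih =>
    rw [List.foldl_cons, ih (d.erase k)]
    show List.filter _ ((d.items.filter (fun p => !(p.1 == k)))) = _
    rw [List.filter_filter]
    simp only [List.contains_cons]
    apply List.filter_congr
    intro p _
    cases h1 : p.1 == k <;> cases h2 : S.contains p.1 <;> simp [h1, h2]

lemma ofList_filter (l : List String) (p : String → Bool) :
    PySem.Set.ofList (l.filter p) = (PySem.Set.ofList l).filter p := by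
  induction l using List.reverseRecOn with
  | nil => rfl
  | append_singleton xs x ih =>
    rw [List.filter_append, PySem.Set.ofList_append_singleton]
    by_cases hp : p x = true
    · simp only [List.filter_cons, hp, if_true, List.filter_nil,
        PySem.Set.ofList_append_singleton, ih]
      unfold PySem.Set.add
      by_cases hx : x ∈ xs <;>
        simp [PySem.Set.contains, List.contains_iff_mem, PySem.Set.mem_ofList, List.mem_filter,
          hx, hp, List.filter_append]
    · have hp' : p x = false := Bool.eq_false_iff.mpr hp
      simp only [List.filter_cons, hp', Bool.false_eq_true, if_false, List.filter_nil,
        List.append_nil, ih]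
      unfold PySem.Set.add
      by_cases hx : x ∈ xs <;>
        simp [PySem.Set.contains, List.contains_iff_mem, PySem.Set.mem_ofList, List.mem_filter,
          hx, hp', List.filter_append]

def pvMemBorder (grid : List (List String)) (c : String) : Prop :=
  ∃ k, ∃ (hk : k < grid.length), ∃ j, ∃ (hj : j < (grid[k]'hk).length),
    (grid[k]'hk)[j]'hj = c ∧
    (k = 0 ∨ k = grid.length - 1 ∨ j = 0 ∨ j = (grid[k]'hk).length - 1)

lemma flag_iff (len m k j : Nat) (hk : k < len) (hj : j < m) :
    pvFlag (len : Int) (m : Int) (k : Int) (j : Int) = true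
      ↔ (k = 0 ∨ k = len - 1 ∨ j = 0 ∨ j = m - 1) := by
  unfold pvFlag
  simp only [Bool.or_eq_true, beq_iff_eq]
  omega

lemma pyGetD_zero {α : Type} (xs : List α) (d : α) (h : xs ≠ []) :
    PySem.List.pyGetD xs 0 d = xs[0]'(List.length_pos_iff.mpr h) := by
  have hl : 0 < xs.length := List.length_pos_iff.mpr h
  simp [PySem.List.pyGetD, PySem.List.pyGet?, PySem.List.pyIdx?, hl]

lemma pyGetD_neg_one {α : Type} (xs : List α) (d : α) (h : xs ≠ []) :
    PySem.List.pyGetD xs (-1) d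
      = xs[xs.length - 1]'(by have := List.length_pos_iff.mpr h; omega) := by
  have hl : 0 < xs.length := List.length_pos_iff.mpr h
  simp only [PySem.List.pyGetD, PySem.List.pyGet?, PySem.List.pyIdx?]
  have h1 : ¬ ((0:Int) ≤ -1) := by omega
  have h2 : -(xs.length : Int) ≤ -1 := by omega
  rw [if_neg h1, if_pos h2]
  show (xs[xs.length - (1:Int).toNat]?).getD d = _
  rw [List.getElem?_eq_getElem (by simpa using Nat.sub_lt hl Nat.one_pos)]
  simp

lemma mem_pvBL (grid : List (List String)) (c : String) :
    c ∈ pvBL grid ↔ (pvMemBorder grid c ∧ ¬(c = ".")) := by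
  unfold pvBL pvMemBorder
  simp only [List.mem_flatMap, List.mem_map, List.mem_filter,
    PySem.List.mem_enumerate_iff, PySem.List.len, Bool.and_eq_true, Bool.not_eq_true',
    beq_eq_false_iff_ne, ne_eq]
  constructor
  · rintro ⟨p, ⟨k, hk, rfl⟩, q, ⟨⟨j, hj, rfl⟩, hne, hflag⟩, rfl⟩
    simp only [zero_add] at hflag ⊢
    rw [flag_iff grid.length (grid[k]'hk).length k j hk hj] at hflag
    exact ⟨⟨k, hk, j, hj, rfl, hflag⟩, hne⟩
  · rintro ⟨⟨k, hk, j, hj, rfl, hflag⟩, hne⟩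
    refine ⟨(0 + (k:Int), grid[k]'hk), ⟨k, hk, rfl⟩,
      (0 + (j:Int), (grid[k]'hk)[j]'hj), ⟨⟨j, hj, rfl⟩, hne, ?_⟩, rfl⟩
    simp only [zero_add]
    rw [flag_iff grid.length (grid[k]'hk).length k j hk hj]
    exact hflag

lemma mem_pvBorderCells (grid : List (List String)) (c : String) :
    c ∈ pvBorderCells grid ↔ pvMemBorder grid c := by
  unfold pvBorderCells pvMemBorder
  cases grid with
  | nil => simp
  | cons r rs =>
    have hne : (r :: rs) ≠ ([] : List (List String)) := by simp
    simp only [List.isEmpty_cons, Bool.false_eq_true, if_false, List.mem_append,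
      List.mem_flatMap]
    rw [pyGetD_zero _ _ hne, pyGetD_neg_one _ _ hne]
    constructor
    · rintro (h | h)
      · rcases h with h0 | hl
        · rcases List.mem_iff_getElem.mp h0 with ⟨j, hj, rfl⟩
          exact ⟨0, by simp, j, hj, rfl, Or.inl rfl⟩
        · rcases List.mem_iff_getElem.mp hl with ⟨j, hj, rfl⟩
          exact ⟨(r :: rs).length - 1, by simp, j, hj, rfl, Or.inr (Or.inl rfl)⟩
      · rcases h with ⟨row, hrow, hmem⟩
        rcases List.mem_iff_getElem.mp hrow with ⟨k, hk, rfl⟩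
        by_cases hemp : ((r :: rs)[k]'hk).isEmpty
        · simp [hemp] at hmem
        · have hnil : ((r :: rs)[k]'hk) ≠ [] := by
            simpa [List.isEmpty_iff] using hemp
          have hpos : 0 < ((r :: rs)[k]'hk).length := List.length_pos_iff.mpr hnil
          simp only [hemp, Bool.false_eq_true, if_false] at hmem
          rw [pyGetD_zero _ _ hnil, pyGetD_neg_one _ _ hnil] at hmem
          rcases List.mem_pair.mp hmem with rfl | rfl
          · exact ⟨k, hk, 0, hpos, rfl, Or.inr (Or.inr (Or.inl rfl))⟩
          · exact ⟨k, hk, _, by omega, rfl, Or.inr (Or.inr (Or.inr rfl))⟩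
    · rintro ⟨k, hk, j, hj, rfl, hflag⟩
      rcases hflag with rfl | rfl | rfl | rfl
      · exact Or.inl (Or.inl (List.mem_iff_getElem.mpr ⟨j, hj, rfl⟩))
      · exact Or.inl (Or.inr (List.mem_iff_getElem.mpr ⟨j, hj, rfl⟩))
      · refine Or.inr ⟨(r :: rs)[k]'hk, List.mem_iff_getElem.mpr ⟨k, hk, rfl⟩, ?_⟩
        have hnil : ((r :: rs)[k]'hk) ≠ [] := by
          intro hcon; rw [hcon] at hj; simp at hj
        have hemp : ((r :: rs)[k]'hk).isEmpty = false := by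
          simpa [List.isEmpty_iff] using hnil
        simp only [hemp, Bool.false_eq_true, if_false]
        rw [pyGetD_zero _ _ hnil]
        exact List.mem_pair.mpr (Or.inl rfl)
      · refine Or.inr ⟨(r :: rs)[k]'hk, List.mem_iff_getElem.mpr ⟨k, hk, rfl⟩, ?_⟩
        have hnil : ((r :: rs)[k]'hk) ≠ [] := by
          intro hcon; rw [hcon] at hj; simp at hj
        have hemp : ((r :: rs)[k]'hk).isEmpty = false := by
          simpa [List.isEmpty_iff] using hnil
        simp only [hemp, Bool.false_eq_true, if_false]
        rw [pyGetD_neg_one _ _ hnil]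
        exact List.mem_pair.mpr (Or.inr rfl)

-- B's infinite set, as written in the port
def pvInf (grid : List (List String)) : PySem.Set String :=
  if grid.isEmpty then PySem.Set.empty
  else
    grid.foldl
      (fun s row =>
        if row.isEmpty then s
        else PySem.Set.update s [PySem.List.pyGetD row 0 "", PySem.List.pyGetD row (-1) ""])
      (PySem.Set.update
        (PySem.Set.update (PySem.Set.empty : PySem.Set String) (PySem.List.pyGetD grid 0 []))
        (PySem.List.pyGetD grid (-1) []))

lemma mem_foldl_ends (rows : List (List String)) (s : PySem.Set String) (y : String) :
    y ∈ rows.foldl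
        (fun s row =>
          if row.isEmpty then s
          else PySem.Set.update s [PySem.List.pyGetD row 0 "", PySem.List.pyGetD row (-1) ""]) s
      ↔ y ∈ s ∨ ∃ row ∈ rows, row.isEmpty = false ∧
          (y = PySem.List.pyGetD row 0 "" ∨ y = PySem.List.pyGetD row (-1) "") := by
  induction rows generalizing s with
  | nil => simp
  | cons r rs ih =>
    rw [List.foldl_cons, ih]
    by_cases h : r.isEmpty = true
    · simp only [h, if_true]
      constructor
      · rintro (hy | hy)
        · exact Or.inl hy
        · exact Or.inr (by rcases hy with ⟨row, hm, hr⟩; exact ⟨row, List.mem_cons_of_mem _ hm, hr⟩)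
      · rintro (hy | ⟨row, hm, hr⟩)
        · exact Or.inl hy
        · rcases List.mem_cons.mp hm with rfl | hm'
          · rw [h] at hr; exact absurd hr.1 (by simp)
          · exact Or.inr ⟨row, hm', hr⟩
    · have h' : r.isEmpty = false := Bool.eq_false_iff.mpr h
      simp only [h', Bool.false_eq_true, if_false, PySem.Set.mem_update, List.mem_pair]
      constructor
      · rintro (⟨hy | hy⟩ | ⟨row, hm, hr⟩)
        · exact Or.inl hy
        · exact Or.inr ⟨r, List.mem_cons_self, h', hy⟩
        · exact Or.inr ⟨row, List.mem_cons_of_mem _ hm, hr⟩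
      · rintro (hy | ⟨row, hm, hr⟩)
        · exact Or.inl (Or.inl hy)
        · rcases List.mem_cons.mp hm with rfl | hm'
          · exact Or.inl (Or.inr hr.2)
          · exact Or.inr ⟨row, hm', hr⟩

lemma mem_pvInf (grid : List (List String)) (y : String) :
    y ∈ pvInf grid ↔ y ∈ pvBorderCells grid := by
  unfold pvInf pvBorderCells
  cases grid with
  | nil => simp [PySem.Set.empty]
  | cons r rs =>
    simp only [List.isEmpty_cons, Bool.false_eq_true, if_false]
    rw [mem_foldl_ends]
    simp only [PySem.Set.mem_update, List.mem_append, List.mem_flatMap, PySem.Set.empty]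
    constructor
    · rintro (⟨⟨h0 | h0⟩ | h0⟩ | ⟨row, hm, hemp, hy⟩)
      · simp at h0
      · exact Or.inl (Or.inl h0)
      · exact Or.inl (Or.inr h0)
      · refine Or.inr ⟨row, hm, ?_⟩
        simp only [hemp, Bool.false_eq_true, if_false, List.mem_pair]
        exact hy
    · rintro (⟨h0 | h0⟩ | ⟨row, hm, hy⟩)
      · exact Or.inl (Or.inl (Or.inr h0))
      · exact Or.inl (Or.inr h0)
      · by_cases hemp : row.isEmpty = true
        · simp [hemp] at hy
        · have hemp' : row.isEmpty = false := Bool.eq_false_iff.mpr hemp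
          simp only [hemp', Bool.false_eq_true, if_false, List.mem_pair] at hy
          exact Or.inr ⟨row, hm, hemp', hy⟩

-- B's candidate-label list is exactly the distinct non-'.' non-border labels in first-occurrence order
lemma labels_eq (grid : List (List String)) :
    grid.foldl
      (fun acc row =>
        row.foldl
          (fun acc c =>
            if !(c == ".") && !(PySem.Set.contains (pvInf grid) c) && !(acc.contains c)
            then acc ++ [c] else acc)
          acc)
      []
    = (PySem.Set.ofList (pvL grid)).filter
        (fun k => !((PySem.Set.ofList (pvBL grid)).contains k)) := by
  rw [← List.foldl_flatten]
  have hstep : (fun (acc : List String) (c : String) =>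
        if !(c == ".") && !(PySem.Set.contains (pvInf grid) c) && !(acc.contains c)
        then acc ++ [c] else acc)
      = (fun acc c =>
        if (fun c => !(c == ".") && !(PySem.Set.contains (pvInf grid) c)) c = true
        then PySem.Set.add acc c else acc) := by
    -- when the label is admitted, appending-if-new IS Set.add
    funext acc c
    by_cases h1 : c = "."
    · simp [h1]
    · by_cases h2 : c ∈ pvInf grid
      · simp [h1, h2]
      · by_cases hc : c ∈ acc <;> simp [h1, h2, hc, PySem.Set.add_eq_ite]
  rw [hstep, PySem.List.foldl_if_eq_foldl_filter, ← PySem.Set.ofList_eq_foldl]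
  have hfl : grid.flatten.filter (fun c => !(c == ".") && !(PySem.Set.contains (pvInf grid) c))
      = (pvL grid).filter (fun c => !(PySem.Set.contains (pvInf grid) c)) := by
    unfold pvL
    rw [List.filter_filter]
    exact List.filter_congr (fun x _ => by
      cases h1 : (x == ".") <;> cases h2 : PySem.Set.contains (pvInf grid) x <;> simp [h1, h2])
  rw [hfl, ofList_filter]
  apply List.filter_congr
  intro k hk
  have hkne : ¬(k = ".") := by
    have := (List.mem_filter.mp ((PySem.Set.mem_ofList _ _).mp hk)).2
    simpa using this
  have h1 : PySem.Set.contains (pvInf grid) k = (PySem.Set.ofList (pvBL grid)).contains k := by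
    rw [Bool.eq_iff_iff, PySem.Set.contains_iff, PySem.Set.contains_eq_listContains,
      List.contains_iff_mem, PySem.Set.mem_ofList, mem_pvInf, mem_pvBorderCells, mem_pvBL]
    exact ⟨fun h => ⟨h, hkne⟩, fun h => h.1⟩
  rw [h1]

lemma count_flatten_int (grid : List (List String)) (c : String) :
    ((grid.flatten.count c : Nat) : Int) = (grid.map (fun row => ((row.count c : Nat) : Int))).sum := by
  induction grid with
  | nil => simp
  | cons r rs ih => simp [List.count_append, ih]

-- B's per-label recount equals the count of that label among all non-'.' cells
lemma recount_eq (grid : List (List String)) (c : String) (hc : ¬(c = ".")) :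
    grid.foldl (fun acc row => acc + (PySem.List.count row c : Int)) 0
      = ((pvL grid).count c : Int) := by
  have h1 : grid.foldl (fun acc row => acc + (PySem.List.count row c : Int)) 0
      = (grid.map (fun row => ((row.count c : Nat) : Int))).sum := by
    rw [PySem.List.foldl_add]
    simp [PySem.List.count_eq]
  rw [h1, ← count_flatten_int]
  unfold pvL
  rw [List.count_filter (by simpa using hc)]

lemma portB_eval (coordinates : List (Int × Int)) (grid : List (List String)) :
    getLargestArea_alt coordinates grid =
      (PySem.List.max?
        ((grid.foldl
            (fun acc row =>
              row.foldl
                (fun acc c =>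
                  if !(c == ".") && !(PySem.Set.contains (pvInf grid) c) && !(acc.contains c)
                  then acc ++ [c] else acc)
                acc)
            []).map (fun c =>
          grid.foldl (fun acc row => acc + (PySem.List.count row c : Int)) 0))
        (fun v => v)).getD 0 := rfl

-- A's surviving dict read off as a value list
lemma valuesA_eq (grid : List (List String)) :
    ((PySem.Set.ofList (pvBL grid)).foldl (fun d point => d.erase point)
        (PySem.Dict.counter (pvL grid))).values
      = ((PySem.Set.ofList (pvL grid)).filter
          (fun k => !((PySem.Set.ofList (pvBL grid)).contains k))).map
          (fun k => ((pvL grid).count k : Int)) := by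
  show (((PySem.Set.ofList (pvBL grid)).foldl (fun d point => d.erase point)
      (PySem.Dict.counter (pvL grid))).items).map (·.2) = _
  rw [items_foldl_erase, PySem.Dict.items_counter, List.filter_map, List.map_map]
  simp only [PySem.Set.contains, Function.comp_def]

-- ===== VERDICT (by name: the statement is the Claim_ definition above) =====
theorem getLargestArea_spec : Claim_equal_getLargestArea := by
  intro coordinates grid _ _
  unfold Spec_getLargestArea
  rw [portA_eval, portB_eval, stateA_eq, labels_eq]
  simp only [valuesA_eq]
  have hmap : ((PySem.Set.ofList (pvL grid)).filter
        (fun k => !((PySem.Set.ofList (pvBL grid)).contains k))).map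
        (fun k => ((pvL grid).count k : Int))
      = ((PySem.Set.ofList (pvL grid)).filter
        (fun k => !((PySem.Set.ofList (pvBL grid)).contains k))).map
        (fun c => grid.foldl (fun acc row => acc + (PySem.List.count row c : Int)) 0) := by
    apply List.map_congr_left
    intro k hk
    have hkne : ¬(k = ".") := by
      have := (List.mem_filter.mp ((PySem.Set.mem_ofList _ _).mp (List.mem_filter.mp hk).1)).2
      simpa using this
    exact (recount_eq grid k hkne).symm
  rw [hmap]
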